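-- pv_equiv track=rewrite | github.com/johnnyflame/advent-of-code-2020 | src/day_10.py | sum_diff
-- ===== SOURCE A (Python) =====
-- from collections import Counter
-- from fileinput import input
--
-- def sum_diff(input):
--     data = [int(x) for x in input.splitlines()]
--     outlet = 0
--     device = max(data) + 3
--     data.extend([outlet, device])
--     data.sort()
--     diff_counter = Counter()
--
--     for prev, curr in zip(data, data[1:]):
--         diff_counter[curr - prev] += 1
--
--     return diff_counter[1] * diff_counter[3]
-- ===== SOURCE B (Python) =====
-- def sum_diff(input):
--     values = {int(x) for x in input.splitlines()}
--     values |= {0, max(values) + 3}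
--     ones = sum(1 for v in values if v + 1 in values)
--     threes = sum(1 for v in values
--                  if v + 3 in values and v + 1 not in values and v + 2 not in values)
--     return ones * threes
-- ===== Notes on version B (the rewrite author's own statement) =====
-- stated objective: alternative
-- what changed: Replaces sort + pairwise zip + Counter with a presence set: after adding 0 and max+3, a 1-gap is counted for each value v with v+1 present, and a 3-gap for each v with v+3 present but v+1 and v+2 absent, with no sorting and no adjacency scan.
import Mathlib
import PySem

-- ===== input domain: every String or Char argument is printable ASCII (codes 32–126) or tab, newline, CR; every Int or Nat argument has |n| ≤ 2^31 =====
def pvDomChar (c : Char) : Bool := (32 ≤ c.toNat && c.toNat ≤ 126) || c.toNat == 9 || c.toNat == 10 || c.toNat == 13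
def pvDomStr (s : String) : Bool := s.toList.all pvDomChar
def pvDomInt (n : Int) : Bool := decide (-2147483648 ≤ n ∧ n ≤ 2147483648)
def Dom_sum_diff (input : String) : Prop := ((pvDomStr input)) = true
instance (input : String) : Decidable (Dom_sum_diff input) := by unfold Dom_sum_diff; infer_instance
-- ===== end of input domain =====

-- B replaces sort + adjacent-pair Counter with a presence-set count of 1-gaps and 3-gaps (alternative algorithm, no sort).

-- ===== PORT A =====
def sum_diff (input : String) : Int :=
  match (PySem.Str.splitlines input).mapM PySem.Int.ofStr? with
  | none => 0      -- int(x) raised ValueError; excluded by Pre_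
  | some data =>
    match PySem.List.max? data (fun x => x) with
    | none => 0    -- max([]) raised ValueError; excluded by Pre_
    | some mx =>
      let data2 := PySem.List.sorted (data ++ [0, mx + 3]) (fun x => x) false
      let dc : PySem.Dict Int Int :=
        (data2.zip (PySem.List.slice data2 (some 1) none)).foldl
          (fun d p => PySem.Dict.modify d (p.2 - p.1) 0 (· + 1)) PySem.Dict.empty
      PySem.Dict.getD dc 1 0 * PySem.Dict.getD dc 3 0

-- ===== PORT B =====
def sum_diff_alt (input : String) : Int :=
  match (PySem.Str.splitlines input).mapM PySem.Int.ofStr? with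
  | none => 0      -- int(x) raised ValueError; excluded by Pre_
  | some vals =>
    let s : PySem.Set Int := PySem.Set.ofList vals
    match PySem.List.max? s (fun x => x) with
    | none => 0    -- max(set()) raised ValueError; excluded by Pre_
    | some mx =>
      let s2 : PySem.Set Int := PySem.Set.union s [0, mx + 3]
      let ones : Int := (s2.countP (fun v => PySem.Set.contains s2 (v + 1)) : Int)
      let threes : Int := (s2.countP (fun v =>
        PySem.Set.contains s2 (v + 3) && !PySem.Set.contains s2 (v + 1)
          && !PySem.Set.contains s2 (v + 2)) : Int)
      ones * threes

-- ===== PRECONDITION & SPEC =====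
-- Pre_ excludes exactly the inputs on which Python A raises ValueError: a line that is not an int literal, or no lines at all (max([])).
def Pre_sum_diff (input : String) : Prop :=
  PySem.Str.splitlines input ≠ [] ∧
    (PySem.Str.splitlines input).all (fun l => (PySem.Int.ofStr? l).isSome) = true
instance (input : String) : Decidable (Pre_sum_diff input) := by unfold Pre_sum_diff; infer_instance
def pvWitness_sum_diff : String := "16\n10\n15\n5\n1\n11\n7\n19\n6\n12\n4"
def Spec_sum_diff (input : String) (out : Int) : Prop := out = sum_diff_alt input
instance (input : String) (out : Int) : Decidable (Spec_sum_diff input out) := by unfold Spec_sum_diff; infer_instance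

-- ===== CLAIM (what is proved, stated in full; the proofs are below) =====
def Claim_equal_sum_diff : Prop := ∀ (input : String), Dom_sum_diff input → Pre_sum_diff input → Spec_sum_diff input (sum_diff input)

-- ===== LEMMAS AND PROOFS =====

-- adjacent differences of a list (the values A's Counter counts)
def pvDiffs (l : List Int) : List Int := (l.zip l.tail).map fun p => p.2 - p.1

-- collapse adjacent duplicates of a sorted list (proof device only)
def pvDsort : List Int → List Int
  | [] => []
  | [a] => [a]
  | a :: b :: t => if a = b then pvDsort (b :: t) else a :: pvDsort (b :: t)

theorem pv_parse_nil (l : List String) (h : l.mapM PySem.Int.ofStr? = some []) : l = [] := by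
  cases l with
  | nil => rfl
  | cons a t =>
    rw [List.mapM_cons] at h
    cases ha : PySem.Int.ofStr? a <;> rw [ha] at h <;> simp [Option.bind_eq_some_iff] at h

theorem pv_parse_ne_none (l : List String)
    (h : l.all (fun x => (PySem.Int.ofStr? x).isSome) = true) :
    l.mapM PySem.Int.ofStr? ≠ none := by
  induction l with
  | nil => simp
  | cons a t ih =>
    simp only [List.all_cons, Bool.and_eq_true] at h
    rw [List.mapM_cons]
    cases ha : PySem.Int.ofStr? a
    · rw [ha] at h; simp at h
    · cases ht : t.mapM PySem.Int.ofStr?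
      · exact absurd ht (ih h.2)
      · simp

theorem pvDiffs_cons_cons (a b : Int) (t : List Int) :
    pvDiffs (a :: b :: t) = (b - a) :: pvDiffs (b :: t) := rfl

theorem pvDsort_mem (l : List Int) (x : Int) : x ∈ pvDsort l ↔ x ∈ l := by
  induction l with
  | nil => simp [pvDsort]
  | cons a t ih =>
    cases t with
    | nil => simp [pvDsort]
    | cons b u =>
      by_cases h : a = b
      · subst h
        rw [show pvDsort (a :: a :: u) = pvDsort (a :: u) by simp [pvDsort], ih]
        simp
      · simp only [pvDsort, if_neg h, List.mem_cons] at *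
        rw [ih]

theorem pvDsort_cons (t : List Int) : ∀ a : Int, ∃ u, pvDsort (a :: t) = a :: u := by
  induction t with
  | nil => intro a; exact ⟨[], rfl⟩
  | cons b u ih =>
    intro a
    by_cases h : a = b
    · obtain ⟨w, hw⟩ := ih b
      exact ⟨w, by simp [pvDsort, h, hw]⟩
    · exact ⟨pvDsort (b :: u), by simp [pvDsort, h]⟩

theorem pvDsort_pairwise (l : List Int) (h : l.Pairwise (· ≤ ·)) :
    (pvDsort l).Pairwise (· < ·) := by
  induction l with
  | nil => simp [pvDsort]
  | cons a t ih =>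
    cases t with
    | nil => simp [pvDsort]
    | cons b u =>
      rcases List.pairwise_cons.mp h with ⟨ha, ht⟩
      by_cases hab : a = b
      · simpa [pvDsort, hab] using ih ht
      · simp only [pvDsort, if_neg hab]
        refine List.pairwise_cons.mpr ⟨?_, ih ht⟩
        intro x hx
        have hxm : x ∈ b :: u := (pvDsort_mem _ _).mp hx
        rcases List.mem_cons.mp hxm with h1 | h1
        · subst h1; exact lt_of_le_of_ne (ha x hxm) hab
        · have hb : b ≤ x := (List.pairwise_cons.mp ht).1 x h1
          have : a ≤ b := ha b List.mem_cons_self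
          have hne : a < b := lt_of_le_of_ne this hab
          omega

theorem pvDsort_count (d : Int) (hd : d ≠ 0) :
    ∀ l : List Int, l.Pairwise (· ≤ ·) →
      (pvDiffs l).count d = (pvDiffs (pvDsort l)).count d := by
  intro l
  induction l with
  | nil => intro _; rfl
  | cons a t ih =>
    intro h
    cases t with
    | nil => rfl
    | cons b u =>
      have ht : (b :: u).Pairwise (· ≤ ·) := (List.pairwise_cons.mp h).2
      by_cases hab : a = b
      · subst hab
        simp only [pvDsort]
        rw [pvDiffs_cons_cons, List.count_cons]
        simpa [hd.symm] using ih ht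
      · simp only [pvDsort, if_neg hab]
        obtain ⟨w, hw⟩ := pvDsort_cons u b
        have ih' := ih ht
        rw [hw] at ih'
        rw [pvDiffs_cons_cons, hw, pvDiffs_cons_cons, List.count_cons, List.count_cons, ih']

theorem pv_count_one (l : List Int) (h : l.Pairwise (· < ·)) :
    (pvDiffs l).count 1 = l.countP (fun v => decide ((v + 1) ∈ l)) := by
  induction l with
  | nil => rfl
  | cons a t ih =>
    rcases List.pairwise_cons.mp h with ⟨ha, ht⟩
    cases t with
    | nil => simp [pvDiffs]
    | cons b u =>
      have hab : a < b := ha b List.mem_cons_self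
      have hbu : ∀ x ∈ u, b < x := (List.pairwise_cons.mp ht).1
      rw [pvDiffs_cons_cons, List.count_cons, List.countP_cons]
      have key1 : ((a + 1) ∈ a :: b :: u) ↔ (b - a = 1) := by
        simp only [List.mem_cons]
        constructor
        · rintro (h' | h' | h')
          · omega
          · omega
          · have := hbu _ h'; omega
        · intro h'; exact Or.inr (Or.inl (by omega))
      have hmem : (decide ((a + 1) ∈ a :: b :: u)) = (decide (b - a = 1)) :=
        decide_eq_decide.mpr key1
      have hcongr : (b :: u).countP (fun v => decide ((v + 1) ∈ a :: b :: u)) =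
          (b :: u).countP (fun v => decide ((v + 1) ∈ b :: u)) := by
        apply List.countP_congr
        intro v hv
        have hav : a < v := ha v hv
        have hne : ¬ ((v + 1) = a) := by omega
        simp [List.mem_cons, hne]
      rw [hcongr, ih ht, hmem]
      by_cases hbd : b - a = 1 <;> simp [hbd]

theorem pv_count_three (l : List Int) (h : l.Pairwise (· < ·)) :
    (pvDiffs l).count 3 =
      l.countP (fun v => decide ((v + 3) ∈ l) && !decide ((v + 1) ∈ l) && !decide ((v + 2) ∈ l)) := by
  induction l with
  | nil => rfl
  | cons a t ih =>
    rcases List.pairwise_cons.mp h with ⟨ha, ht⟩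
    cases t with
    | nil => simp [pvDiffs]
    | cons b u =>
      have hab : a < b := ha b List.mem_cons_self
      have hbu : ∀ x ∈ u, b < x := (List.pairwise_cons.mp ht).1
      rw [pvDiffs_cons_cons, List.count_cons, List.countP_cons]
      have key3 : ((((a + 3) ∈ a :: b :: u) ∧ ¬ ((a + 1) ∈ a :: b :: u)) ∧
          ¬ ((a + 2) ∈ a :: b :: u)) ↔ (b - a = 3) := by
        simp only [List.mem_cons]
        constructor
        · rintro ⟨⟨h3, h1⟩, h2⟩
          rcases h3 with h' | h' | h'
          · omega
          · omega
          · have hb := hbu _ h'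
            have n1 : ¬ (a + 1 = b) := fun hh => h1 (Or.inr (Or.inl hh))
            have n2 : ¬ (a + 2 = b) := fun hh => h2 (Or.inr (Or.inl hh))
            omega
        · intro h'
          refine ⟨⟨Or.inr (Or.inl (by omega)), ?_⟩, ?_⟩
          · rintro (hh | hh | hh)
            · omega
            · omega
            · have := hbu _ hh; omega
          · rintro (hh | hh | hh)
            · omega
            · omega
            · have := hbu _ hh; omega
      have hhead : (decide ((a + 3) ∈ a :: b :: u) && !decide ((a + 1) ∈ a :: b :: u)
          && !decide ((a + 2) ∈ a :: b :: u)) = decide (b - a = 3) := by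
        simp only [← decide_not, ← Bool.decide_and]
        exact decide_eq_decide.mpr key3
      have hcongr : (b :: u).countP (fun v => decide ((v + 3) ∈ a :: b :: u)
            && !decide ((v + 1) ∈ a :: b :: u) && !decide ((v + 2) ∈ a :: b :: u)) =
          (b :: u).countP (fun v => decide ((v + 3) ∈ b :: u)
            && !decide ((v + 1) ∈ b :: u) && !decide ((v + 2) ∈ b :: u)) := by
        apply List.countP_congr
        intro v hv
        have hav : a < v := ha v hv
        have h1 : ¬ ((v + 1) = a) := by omega
        have h2 : ¬ ((v + 2) = a) := by omega
        have h3 : ¬ ((v + 3) = a) := by omega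
        simp [List.mem_cons, h1, h2, h3]
      rw [hcongr, ih ht, hhead]
      by_cases hbd : b - a = 3 <;> simp [hbd]

-- ===== VERDICT (by name: the statement is the Claim_ definition above) =====
theorem sum_diff_spec : Claim_equal_sum_diff := by
  intro input _ hpre
  unfold Spec_sum_diff sum_diff sum_diff_alt
  cases hparse : (PySem.Str.splitlines input).mapM PySem.Int.ofStr? with
  | none => exact absurd hparse (pv_parse_ne_none _ hpre.2)
  | some data =>
    cases data with
    | nil => exact absurd (pv_parse_nil _ hparse) hpre.1
    | cons x xs =>
      obtain ⟨mA, hA⟩ : ∃ m, PySem.List.max? (x :: xs) (fun v => v) = some m := by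
        cases hm : PySem.List.max? (x :: xs) (fun v => v) with
        | none => exact absurd ((PySem.List.max?_eq_none_iff _ _).mp hm) (by simp)
        | some m => exact ⟨m, rfl⟩
      obtain ⟨mB, hB⟩ : ∃ m, PySem.List.max? (PySem.Set.ofList (x :: xs)) (fun v => v) = some m := by
        cases hm : PySem.List.max? (PySem.Set.ofList (x :: xs)) (fun v => v) with
        | none =>
          have hx : x ∈ PySem.Set.ofList (x :: xs) :=
            (PySem.Set.mem_ofList _ _).mpr List.mem_cons_self
          rw [(PySem.List.max?_eq_none_iff _ _).mp hm] at hx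
          simp at hx
        | some m => exact ⟨m, rfl⟩
      have hmAB : mA = mB := by
        have h1 : mA ≤ mB :=
          PySem.List.max?_isMax hB mA ((PySem.Set.mem_ofList _ _).mpr (PySem.List.max?_mem hA))
        have h2 : mB ≤ mA :=
          PySem.List.max?_isMax hA mB ((PySem.Set.mem_ofList _ _).mp (PySem.List.max?_mem hB))
        omega
      simp only [hA, hB, ← hmAB]
      -- names for the two data structures
      have core : ∀ (L s2 : List Int), L.Pairwise (· ≤ ·) → s2.Nodup →
          (∀ y, y ∈ s2 ↔ y ∈ L) →
          ((L.zip L.tail).foldl (fun d p => PySem.Dict.modify d (p.2 - p.1) 0 (· + 1))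
              (PySem.Dict.empty : PySem.Dict Int Int)).getD 1 0 *
            ((L.zip L.tail).foldl (fun d p => PySem.Dict.modify d (p.2 - p.1) 0 (· + 1))
              (PySem.Dict.empty : PySem.Dict Int Int)).getD 3 0 =
          (s2.countP (fun v => PySem.Set.contains s2 (v + 1)) : Int) *
            (s2.countP (fun v => PySem.Set.contains s2 (v + 3)
              && !PySem.Set.contains s2 (v + 1) && !PySem.Set.contains s2 (v + 2)) : Int) := by
        intro L s2 hPle hnodup hmem
        -- A's Counter lookups are counts of the adjacent-difference list
        have hfold : ∀ v : Int,
            ((L.zip L.tail).foldl (fun d p => PySem.Dict.modify d (p.2 - p.1) 0 (· + 1))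
              (PySem.Dict.empty : PySem.Dict Int Int)).getD v 0 = ((pvDiffs L).count v : Int) := by
          intro v
          have h1 : (pvDiffs L).foldl (fun d y => PySem.Dict.modify d y 0 (· + 1))
                (PySem.Dict.empty : PySem.Dict Int Int)
              = (L.zip L.tail).foldl (fun d p => PySem.Dict.modify d (p.2 - p.1) 0 (· + 1))
                (PySem.Dict.empty : PySem.Dict Int Int) := by
            unfold pvDiffs
            rw [List.foldl_map]
          rw [← h1, PySem.Dict.getD_foldl_modify_add_one]
          simp [pysem]
        -- collapse duplicates
        have hPlt : (pvDsort L).Pairwise (· < ·) := pvDsort_pairwise L hPle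
        have hUnodup : (pvDsort L).Nodup := hPlt.imp (fun h => ne_of_lt h)
        have hperm : s2.Perm (pvDsort L) :=
          (List.perm_ext_iff_of_nodup hnodup hUnodup).mpr
            (fun y => (hmem y).trans (pvDsort_mem L y).symm)
        have hmem' : ∀ y, y ∈ s2 ↔ y ∈ pvDsort L :=
          fun y => (hmem y).trans (pvDsort_mem L y).symm
        -- B's membership counts, moved onto pvDsort L
        have hones : s2.countP (fun v => PySem.Set.contains s2 (v + 1)) =
            (pvDsort L).countP (fun v => decide ((v + 1) ∈ pvDsort L)) := by
          rw [hperm.countP_eq]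
          apply List.countP_congr
          intro v _
          simp [PySem.Set.contains, hmem' (v + 1)]
        have hthrees : s2.countP (fun v => PySem.Set.contains s2 (v + 3)
              && !PySem.Set.contains s2 (v + 1) && !PySem.Set.contains s2 (v + 2)) =
            (pvDsort L).countP (fun v => decide ((v + 3) ∈ pvDsort L)
              && !decide ((v + 1) ∈ pvDsort L) && !decide ((v + 2) ∈ pvDsort L)) := by
          rw [hperm.countP_eq]
          apply List.countP_congr
          intro v _
          simp [PySem.Set.contains, hmem' (v + 1), hmem' (v + 2), hmem' (v + 3)]
        rw [hfold 1, hfold 3, hones, hthrees,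
          pvDsort_count 1 (by omega) L hPle, pvDsort_count 3 (by omega) L hPle,
          pv_count_one _ hPlt, pv_count_three _ hPlt]
      -- instantiate with A's sorted list and B's set
      have hPle : (PySem.List.sorted ((x :: xs) ++ [0, mA + 3]) (fun v => v) false).Pairwise
          (· ≤ ·) := by
        have := PySem.List.sorted_pairwise ((x :: xs) ++ [0, mA + 3]) (fun v => v)
        simpa using this
      have hs2 : PySem.Set.union (PySem.Set.ofList (x :: xs)) [0, mA + 3] =
          PySem.Set.add (PySem.Set.add (PySem.Set.ofList (x :: xs)) 0) (mA + 3) := rfl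
      have hnodup : (PySem.Set.union (PySem.Set.ofList (x :: xs)) [0, mA + 3]).Nodup := by
        rw [hs2]
        exact PySem.Set.nodup_add _ _ (PySem.Set.nodup_add _ _ (PySem.Set.nodup_ofList _))
      have hmem : ∀ y, y ∈ PySem.Set.union (PySem.Set.ofList (x :: xs)) [0, mA + 3] ↔
          y ∈ PySem.List.sorted ((x :: xs) ++ [0, mA + 3]) (fun v => v) false := by
        intro y
        rw [hs2, PySem.List.mem_sorted]
        simp [PySem.Set.mem_add, PySem.Set.mem_ofList, List.mem_append, or_comm, or_assoc]
      rw [PySem.List.slice_from_one]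
      exact core _ _ hPle hnodup hmem
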